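-- pv_equiv track=rewrite | github.com/nanthiniSanthanam/eduplatform | frontend/frontend_backend_analyzer.py | _url_to_django_pattern
-- ===== SOURCE A (Python) =====
-- from typing import Dict, List, Set, Tuple, Any
--
-- def _url_to_django_pattern(url: str) -> Tuple[str, str]:
--     """Convert an API URL to a Django URL pattern and view name"""
--     parts = url.strip('/').split('/')
--     pattern_parts = []
--     param_names = []
--
--     for part in parts:
--         # Check if this part is a parameter (e.g., :id, {id}, etc.)
--         if part.startswith(':') or (part.startswith('{') and part.endswith('}')):
--             param_name = part.strip(':{}')
--             pattern_parts.append(f'<{param_name}>')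
--             param_names.append(param_name)
--         else:
--             pattern_parts.append(part)
--
--     pattern = '/'.join(pattern_parts)
--
--     # Generate a view name based on the URL pattern
--     if not parts:
--         view_name = "index"
--     else:
--         # Use the last non-parameter part as the base name
--         base_parts = [p for p in parts if not (p.startswith(':') or (p.startswith('{') and p.endswith('}')))]
--         view_base = base_parts[-1] if base_parts else parts[0].strip(':{}')
--
--         # Add parameter indicators
--         if param_names:
--             view_name = f"{view_base}_detail"
--         else:
--             view_name = f"{view_base}_list"
--
--     return pattern, view_name
-- ===== SOURCE B (Python) =====
-- def _url_to_django_pattern(url: str):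
--     """Convert an API URL to a Django URL pattern and view name.
--
--     Recursive right-to-left decomposition: one structural recursion over the
--     parts list returns (joined pattern, rightmost non-param part or None,
--     has_param) directly; no pattern_parts list, no join, no filter pass.
--     """
--     def go(ps):
--         if not ps:
--             return '', None, False
--         head, tail = ps[0], ps[1:]
--         pat_t, base_t, hp_t = go(tail)
--         if head.startswith(':') or (head.startswith('{') and head.endswith('}')):
--             seg, base, hp = '<' + head.strip(':{}') + '>', base_t, True
--         else:
--             seg, base, hp = head, (base_t if base_t is not None else head), hp_t
--         return (seg if not tail else seg + '/' + pat_t), base, hp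
--
--     parts = url.strip('/').split('/')
--     pattern, base, has_param = go(parts)
--     view_base = base if base is not None else parts[0].strip(':{}')
--     return pattern, view_base + ('_detail' if has_param else '_list')
-- ===== Notes on version B (the rewrite author's own statement) =====
-- stated objective: alternative
-- what changed: B replaces A's forward loop plus separate filtering comprehension plus the final separator-join by a single structural recursion from the right that builds the joined pattern string directly and returns the rightmost non-parameter part and a has-param flag as it unwinds.
import Mathlib
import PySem

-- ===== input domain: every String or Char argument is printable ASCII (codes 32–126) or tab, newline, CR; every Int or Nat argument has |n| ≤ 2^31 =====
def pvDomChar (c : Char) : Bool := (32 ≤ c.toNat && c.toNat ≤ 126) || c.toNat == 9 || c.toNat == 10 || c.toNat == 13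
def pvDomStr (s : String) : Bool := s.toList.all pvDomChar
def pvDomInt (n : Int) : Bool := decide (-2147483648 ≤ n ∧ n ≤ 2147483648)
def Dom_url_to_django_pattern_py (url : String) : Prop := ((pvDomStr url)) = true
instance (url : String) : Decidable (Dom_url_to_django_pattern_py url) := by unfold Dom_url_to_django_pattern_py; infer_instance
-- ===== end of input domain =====

-- B replaces A's loop + second filtering comprehension + join by one structural
-- recursion from the right that builds the joined pattern string directly and
-- returns the rightmost non-param part; objective: alternative decomposition.


-- part.startswith(':') or (part.startswith('{') and part.endswith('}'))
def pvIsParam (part : String) : Bool :=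
  PySem.Str.startswith part ":" || (PySem.Str.startswith part "{" && PySem.Str.endswith part "}")

-- ===== PORT A =====
def url_to_django_pattern_py (url : String) : String × String :=
  -- parts = url.strip('/').split('/')   (sep "/" ≠ "", so split? is exact; getD [] never fires)
  let parts : List String := (PySem.Str.split? (PySem.Str.stripChars url "/") "/").getD []
  -- the for-loop over parts accumulating (pattern_parts, param_names)
  let st : List String × List String :=
    parts.foldl (fun (acc : List String × List String) part =>
      if pvIsParam part then
        (acc.1 ++ ["<" ++ PySem.Str.stripChars part ":{}" ++ ">"], acc.2 ++ [PySem.Str.stripChars part ":{}"])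
      else
        (acc.1 ++ [part], acc.2)) ([], [])
  let pattern := PySem.Str.join "/" st.1
  let view_name :=
    if parts = [] then "index"
    else
      let base_parts := parts.filter (fun p => !(pvIsParam p))
      -- base_parts[-1] (guarded by 'if base_parts'); parts[0] (parts is nonempty here)
      let view_base := if base_parts ≠ [] then (PySem.List.pyGet? base_parts (-1)).getD ""
                       else PySem.Str.stripChars ((PySem.List.pyGet? parts 0).getD "") ":{}"
      if st.2 ≠ [] then view_base ++ "_detail" else view_base ++ "_list"
  (pattern, view_name)

-- ===== PORT B =====
-- the inner recursive helper go(ps) of Source B: (pattern, base_or_None, has_param)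
def pvGoB : List String → String × Option String × Bool
  | [] => ("", none, false)
  | part :: tail =>
    let r := pvGoB tail
    let s : String × Option String × Bool :=
      if pvIsParam part then
        ("<" ++ PySem.Str.stripChars part ":{}" ++ ">", r.2.1, true)
      else
        (part, (r.2.1).or (some part), r.2.2)
    ((if tail = [] then s.1 else s.1 ++ "/" ++ r.1), s.2.1, s.2.2)

def url_to_django_pattern_py_alt (url : String) : String × String :=
  let parts : List String := (PySem.Str.split? (PySem.Str.stripChars url "/") "/").getD []
  let r := pvGoB parts
  let view_base := match r.2.1 with
    | some b => b
    | none => PySem.Str.stripChars (parts.headD "") ":{}"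
  (r.1, view_base ++ (if r.2.2 then "_detail" else "_list"))

-- ===== PRECONDITION & SPEC =====
def Spec_url_to_django_pattern_py (url : String) (out : String × String) : Prop := out = url_to_django_pattern_py_alt url
instance (url : String) (out : String × String) : Decidable (Spec_url_to_django_pattern_py url out) := by unfold Spec_url_to_django_pattern_py; infer_instance

-- ===== CLAIM =====
def Claim_equal_url_to_django_pattern_py : Prop := ∀ (url : String), Dom_url_to_django_pattern_py url → Spec_url_to_django_pattern_py url (url_to_django_pattern_py url)

-- ===== LEMMAS AND PROOFS =====

-- A's loop: the two accumulators are append-maps over parts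
theorem foldA_eq (parts : List String) (pp pn : List String) :
    parts.foldl (fun (acc : List String × List String) part =>
      if pvIsParam part then
        (acc.1 ++ ["<" ++ PySem.Str.stripChars part ":{}" ++ ">"], acc.2 ++ [PySem.Str.stripChars part ":{}"])
      else
        (acc.1 ++ [part], acc.2)) (pp, pn)
    = (pp ++ parts.map (fun p => if pvIsParam p then "<" ++ PySem.Str.stripChars p ":{}" ++ ">" else p),
       pn ++ (parts.filter pvIsParam).map (fun p => PySem.Str.stripChars p ":{}")) := by
  induction parts generalizing pp pn with
  | nil => simp
  | cons h t ih =>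
    by_cases hp : pvIsParam h <;> simp [hp, ih]

-- separator-join of a one-element list
theorem join_single (p : String) : PySem.Str.join "/" [p] = p := by
  simp [PySem.Str.join, PySem.Chars.join_singleton, String.ofList_toList]

-- separator-join of a list with ≥ 2 elements peels off the head
theorem join_cons₂ (a b : String) (r : List String) :
    PySem.Str.join "/" (a :: b :: r) = a ++ "/" ++ PySem.Str.join "/" (b :: r) := by
  unfold PySem.Str.join
  simp only [List.map_cons]
  rw [PySem.Chars.join_cons_cons]
  apply String.toList_injective
  simp

-- B's recursion computes: the joined mapped pattern, the rightmost non-param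
-- part, and whether any part is a parameter
theorem pvGoB_eq (parts : List String) :
    pvGoB parts
    = (PySem.Str.join "/" (parts.map (fun p => if pvIsParam p then "<" ++ PySem.Str.stripChars p ":{}" ++ ">" else p)),
       (parts.filter (fun p => !(pvIsParam p))).getLast?,
       parts.any pvIsParam) := by
  induction parts with
  | nil => simp [pvGoB]; rfl
  | cons h t ih =>
    rw [pvGoB, ih]
    cases t with
    | nil =>
      by_cases hp : pvIsParam h <;> simp [hp, join_single]
    | cons b r =>
      have hjoin := join_cons₂
        (if pvIsParam h then "<" ++ PySem.Str.stripChars h ":{}" ++ ">" else h)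
        (if pvIsParam b then "<" ++ PySem.Str.stripChars b ":{}" ++ ">" else b)
        ((r.map (fun p => if pvIsParam p then "<" ++ PySem.Str.stripChars p ":{}" ++ ">" else p)))
      by_cases hp : pvIsParam h
      · simp only [hp, if_true, List.map_cons] at hjoin ⊢
        rw [hjoin]
        simp [List.filter_cons, hp, List.any_cons]
      · rw [Bool.not_eq_true] at hp
        simp only [hp, Bool.false_eq_true, if_false, List.map_cons] at hjoin ⊢
        rw [hjoin]
        simp [List.filter_cons, hp, List.any_cons, List.getLast?_cons, Option.or]
        cases hO : (if pvIsParam b = false then b :: List.filter (fun p => !pvIsParam p) r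
            else List.filter (fun p => !pvIsParam p) r).getLast? <;> simp [hO]

-- splitOn's worker never returns the empty list
theorem go_ne_nil (sep : List Char) (fuel : Nat) (l cur : List Char) (acc : List (List Char)) :
    PySem.Chars.splitOn.go sep fuel l cur acc ≠ [] := by
  induction fuel generalizing l cur acc with
  | zero => simp [PySem.Chars.splitOn.go]
  | succ n ih =>
    cases l with
    | nil => simp [PySem.Chars.splitOn.go]
    | cons c rest =>
      rw [PySem.Chars.splitOn.go]
      split
      · exact ih _ _ _
      · exact ih _ _ _

-- s.split('/') always yields at least one piece
theorem splitOn_slash_ne_nil (cs : List Char) : PySem.Chars.splitOn cs ['/'] ≠ [] := by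
  unfold PySem.Chars.splitOn
  exact go_ne_nil _ _ _ _ _

theorem split_slash_ne_nil (s : String) : (PySem.Str.split? s "/").getD [] ≠ [] := by
  have hm := PySem.Str.split?_map s "/"
  have hcs : PySem.Chars.split? s.toList "/".toList = some (PySem.Chars.splitOn s.toList "/".toList) := by
    unfold PySem.Chars.split?
    simp
  rw [hcs] at hm
  cases hl : PySem.Str.split? s "/" with
  | none => rw [hl] at hm; simp at hm
  | some l =>
    rw [hl] at hm
    simp only [Option.map_some, Option.some.injEq] at hm
    simp only [Option.getD_some]
    intro h
    subst h
    simp at hm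
    exact splitOn_slash_ne_nil s.toList hm

-- xs[-1] on a nonempty list is its last element
theorem pyGet?_neg_one (l : List String) (h : l ≠ []) :
    PySem.List.pyGet? l (-1) = l.getLast? := by
  have h1 : 1 ≤ l.length := List.length_pos_of_ne_nil h
  simp [PySem.List.pyGet?, PySem.List.pyIdx?, h1]
  rw [List.getLast?_eq_getElem?]

-- ===== VERDICT =====
theorem url_to_django_pattern_py_spec : Claim_equal_url_to_django_pattern_py := by
  intro url _
  unfold Spec_url_to_django_pattern_py url_to_django_pattern_py url_to_django_pattern_py_alt
  simp only [foldA_eq, pvGoB_eq]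
  have hne := split_slash_ne_nil (PySem.Str.stripChars url "/")
  rcases hp : (PySem.Str.split? (PySem.Str.stripChars url "/") "/").getD [] with _ | ⟨p0, rest⟩
  · exact absurd hp hne
  · have hiff : (List.map (fun p => PySem.Str.stripChars p ":{}") (List.filter pvIsParam (p0 :: rest)) ≠ [])
        ↔ (p0 :: rest).any pvIsParam = true := by
      simp [List.filter_eq_nil_iff, List.any_eq_true]
      by_cases h0 : pvIsParam p0 <;> simp [h0]
    by_cases hfil : List.filter (fun p => !pvIsParam p) (p0 :: rest) = []
    · simp only [hfil, List.nil_append, List.getLast?_nil, hiff]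
      simp [PySem.List.pyGet?, PySem.List.pyIdx?]
      split <;> rfl
    · obtain ⟨x, hx⟩ : ∃ x, (List.filter (fun p => !pvIsParam p) (p0 :: rest)).getLast? = some x := by
        cases hx : (List.filter (fun p => !pvIsParam p) (p0 :: rest)).getLast? with
        | none => exact absurd (List.getLast?_eq_none_iff.mp hx) hfil
        | some x => exact ⟨x, rfl⟩
      simp only [List.nil_append, pyGet?_neg_one _ hfil, hx, hiff]
      simp [hfil]
      split <;> rfl
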